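-- pv_equiv track=rewrite | github.com/Timo123456789/DL4SVD | Code/create_own_folds.py | get_indices_of_folds_with_smallest_object_count
-- ===== SOURCE A (Python) =====
-- def get_indices_of_folds_with_smallest_object_count(fold_arr_counter, object_name):
--     """
--     Finds the indices of folds with the smallest count of a given object.
--
--     Args:
--         fold_arr_counter (list): List of dictionaries with object counts per fold.
--         object_name (str): Name of the object to count (e.g., "car").
--
--     Returns:
--         list: List of indices of folds with the smallest count for the specified object.
--     """
--     if not fold_arr_counter:
--         return []
--
--     min_count = float('inf')
--     # Speichern der Indizes der Folds mit der kleinsten Zaehlung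
--     smallest_fold_indices = []
--
--     for i, fold_data in enumerate(fold_arr_counter):
--         if object_name in fold_data["data"]:
--             current_count = fold_data["data"][object_name]
--
--             if current_count < min_count:
--                 min_count = current_count
--                 smallest_fold_indices = [i] # Starte eine neue Liste, da ein kleinerer Wert gefunden wurde
--             elif current_count == min_count:
--                 smallest_fold_indices.append(i) # Fuege Index hinzu, wenn der Wert gleich ist
--
--     return smallest_fold_indices
-- ===== SOURCE B (Python) =====
-- def get_indices_of_folds_with_smallest_object_count(fold_arr_counter, object_name):
--     pairs = [(i, fold_data["data"][object_name])
--              for i, fold_data in enumerate(fold_arr_counter)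
--              if object_name in fold_data["data"]]
--     if not pairs:
--         return []
--     m = min(c for _, c in pairs)
--     return [i for i, c in pairs if c == m]
-- ===== Notes on version B (the rewrite author's own statement) =====
-- stated objective: simpler
-- what changed: Replaces the single running-min loop with reset/append bookkeeping by a build-then-reduce-then-filter pipeline: collect (index,count) pairs, take the min, filter the indices equal to it.
import Mathlib
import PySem

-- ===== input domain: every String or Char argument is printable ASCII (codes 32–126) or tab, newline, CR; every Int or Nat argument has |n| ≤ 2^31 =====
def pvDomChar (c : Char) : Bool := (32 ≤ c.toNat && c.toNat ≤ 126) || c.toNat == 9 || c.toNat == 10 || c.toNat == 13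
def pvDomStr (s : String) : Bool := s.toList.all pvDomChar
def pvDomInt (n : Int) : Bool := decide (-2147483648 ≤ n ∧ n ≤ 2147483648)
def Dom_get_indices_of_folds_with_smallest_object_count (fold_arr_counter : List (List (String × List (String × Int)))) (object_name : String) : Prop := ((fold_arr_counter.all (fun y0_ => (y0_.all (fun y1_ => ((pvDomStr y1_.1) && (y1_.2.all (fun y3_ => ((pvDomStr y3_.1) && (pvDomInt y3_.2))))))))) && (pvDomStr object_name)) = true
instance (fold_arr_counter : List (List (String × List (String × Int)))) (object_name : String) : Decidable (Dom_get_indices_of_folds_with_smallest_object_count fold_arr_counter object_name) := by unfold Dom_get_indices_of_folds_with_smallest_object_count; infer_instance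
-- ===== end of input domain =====

-- B replaces A's running-min loop (reset/append bookkeeping) by a build-then-reduce-then-filter
-- pipeline; same cost, simpler decomposition.

-- ===== PORT A =====
-- A's loop state: (min_count as Option Int — none = float('inf'), smallest_fold_indices).
-- fold_data["data"] is ported as (lookup "data").getD []: the KeyError case (lookup = none) is
-- excluded by Pre_, so the default is never read there.
def pvStepA (object_name : String) (st : Option Int × List Int)
    (p : Int × List (String × List (String × Int))) : Option Int × List Int :=
  match ((p.2.lookup "data").getD []).lookup object_name with
  | none => st
  | some c =>
    match st.1 with
    | none => (some c, [p.1])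
    | some m =>
      if c < m then (some c, [p.1])
      else if c = m then (st.1, st.2 ++ [p.1])
      else st

def get_indices_of_folds_with_smallest_object_count (fold_arr_counter : List (List (String × List (String × Int)))) (object_name : String) : List Int :=
  if fold_arr_counter = [] then []
  else ((PySem.List.enumerate fold_arr_counter).foldl (pvStepA object_name) (none, [])).2

-- ===== PORT B =====
def get_indices_of_folds_with_smallest_object_count_alt (fold_arr_counter : List (List (String × List (String × Int)))) (object_name : String) : List Int :=
  let pairs := (PySem.List.enumerate fold_arr_counter).filterMap
    (fun p => (((p.2.lookup "data").getD []).lookup object_name).map (fun c => (p.1, c)))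
  if pairs = [] then []
  else
    match PySem.List.min? (pairs.map (·.2)) (fun x => x) with
    | none => []
    | some m => (pairs.filter (fun q => q.2 == m)).map (·.1)

-- ===== PRECONDITION & SPEC =====
-- Pre_ excludes exactly the inputs where Python A raises KeyError: some fold without a "data" key.
def Pre_get_indices_of_folds_with_smallest_object_count (fold_arr_counter : List (List (String × List (String × Int)))) (object_name : String) : Prop :=
  fold_arr_counter.all (fun f => (f.lookup "data").isSome) = true
instance (fold_arr_counter : List (List (String × List (String × Int)))) (object_name : String) : Decidable (Pre_get_indices_of_folds_with_smallest_object_count fold_arr_counter object_name) := by unfold Pre_get_indices_of_folds_with_smallest_object_count; infer_instance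

def pvWitness_get_indices_of_folds_with_smallest_object_count : (List (List (String × List (String × Int)))) × String :=
  ([[("data", [("car", 3)])], [("data", [("car", 1)])]], "car")

def Spec_get_indices_of_folds_with_smallest_object_count (fold_arr_counter : List (List (String × List (String × Int)))) (object_name : String) (out : List Int) : Prop := out = get_indices_of_folds_with_smallest_object_count_alt fold_arr_counter object_name
instance (fold_arr_counter : List (List (String × List (String × Int)))) (object_name : String) (out : List Int) : Decidable (Spec_get_indices_of_folds_with_smallest_object_count fold_arr_counter object_name out) := by unfold Spec_get_indices_of_folds_with_smallest_object_count; infer_instance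

-- ===== CLAIM (what is proved, stated in full; the proofs are below) =====
def Claim_equal_get_indices_of_folds_with_smallest_object_count : Prop := ∀ (fold_arr_counter : List (List (String × List (String × Int)))) (object_name : String), Dom_get_indices_of_folds_with_smallest_object_count fold_arr_counter object_name → Pre_get_indices_of_folds_with_smallest_object_count fold_arr_counter object_name → Spec_get_indices_of_folds_with_smallest_object_count fold_arr_counter object_name (get_indices_of_folds_with_smallest_object_count fold_arr_counter object_name)

-- ===== LEMMAS AND PROOFS =====

-- the step of A's loop restricted to the pairs that survive the membership test
def pvStepG (st : Option Int × List Int) (q : Int × Int) : Option Int × List Int :=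
  match st.1 with
  | none => (some q.2, [q.1])
  | some m =>
    if q.2 < m then (some q.2, [q.1])
    else if q.2 = m then (st.1, st.2 ++ [q.1])
    else st

-- A's fold over the enumerated list is the fold of pvStepG over the filtered pairs
lemma pv_foldA_eq (object_name : String) :
    ∀ (l : List (Int × List (String × List (String × Int)))) (st : Option Int × List Int),
      l.foldl (pvStepA object_name) st
        = (l.filterMap (fun p => (((p.2.lookup "data").getD []).lookup object_name).map
            (fun c => (p.1, c)))).foldl pvStepG st := by
  intro l
  induction l with
  | nil => intro st; rfl
  | cons p t ih =>
    intro st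
    simp only [List.foldl_cons, List.filterMap_cons]
    cases h : ((p.2.lookup "data").getD []).lookup object_name with
    | none => simp [pvStepA, h, ih]
    | some c => simp [pvStepA, pvStepG, h, ih]

lemma pv_foldl_min_le_init (m : Int) : ∀ (l : List Int), List.foldl min m l ≤ m := by
  intro l
  induction l generalizing m with
  | nil => simp
  | cons c t ih =>
    calc List.foldl min m (c :: t) = List.foldl min (min m c) t := rfl
    _ ≤ min m c := ih _
    _ ≤ m := min_le_left _ _

-- characterisation of A's loop from a finite state
lemma pv_loop_some : ∀ (ps : List (Int × Int)) (m : Int) (acc : List Int),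
    ps.foldl pvStepG (some m, acc)
      = (some (List.foldl min m (ps.map (·.2))),
         (if List.foldl min m (ps.map (·.2)) = m then acc else [])
           ++ (ps.filter (fun q => q.2 == List.foldl min m (ps.map (·.2)))).map (·.1)) := by
  intro ps
  induction ps with
  | nil => intro m acc; simp
  | cons q t ih =>
    intro m acc
    obtain ⟨i, c⟩ := q
    by_cases h1 : c < m
    · have hm : min m c = c := by omega
      have hle : List.foldl min c (t.map (·.2)) ≤ c := pv_foldl_min_le_init _ _
      simp only [List.foldl_cons, List.map_cons]
      have hstep : pvStepG (some m, acc) (i, c) = (some c, [i]) := by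
        simp [pvStepG, h1]
      rw [hstep, ih]
      simp only [List.foldl_cons, hm] at *
      have hMm : ¬ List.foldl min c (t.map (·.2)) = m := by omega
      by_cases h2 : List.foldl min c (t.map (·.2)) = c
      · simp [h2]
        intro h; exact absurd h (by omega)
      · have h2' : ¬ c = List.foldl min c (t.map (·.2)) := fun h => h2 h.symm
        simp [h2, h2', hMm, beq_iff_eq]
    · by_cases h2 : c = m
      · subst h2
        have hm : min c c = c := by omega
        have hle : List.foldl min c (t.map (·.2)) ≤ c := pv_foldl_min_le_init _ _
        simp only [List.foldl_cons, List.map_cons]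
        have hstep : pvStepG (some c, acc) (i, c) = (some c, acc ++ [i]) := by
          simp [pvStepG]
        rw [hstep, ih]
        simp only [hm]
        by_cases h3 : List.foldl min c (t.map (·.2)) = c
        · simp [h3]
        · have h3' : ¬ c = List.foldl min c (t.map (·.2)) := fun h => h3 h.symm
          simp [h3, h3']
      · have h3 : m < c := by omega
        have hm : min m c = m := by omega
        have hle : List.foldl min m (t.map (·.2)) ≤ m := pv_foldl_min_le_init _ _
        simp only [List.foldl_cons, List.map_cons]
        have hstep : pvStepG (some m, acc) (i, c) = (some m, acc) := by
          simp [pvStepG, h1, h2]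
        rw [hstep, ih]
        simp only [hm]
        have : ¬ (c = List.foldl min m (t.map (·.2))) := by omega
        simp [beq_iff_eq, this]

-- ===== VERDICT (by name: the statement is the Claim_ definition above) =====
theorem get_indices_of_folds_with_smallest_object_count_spec : Claim_equal_get_indices_of_folds_with_smallest_object_count := by
  intro fc name _ _
  unfold Spec_get_indices_of_folds_with_smallest_object_count
  unfold get_indices_of_folds_with_smallest_object_count
  unfold get_indices_of_folds_with_smallest_object_count_alt
  by_cases hfc : fc = []
  · subst hfc; rfl
  · simp only [if_neg hfc]
    rw [pv_foldA_eq]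
    set ps := (PySem.List.enumerate fc).filterMap
      (fun p => (((p.2.lookup "data").getD []).lookup name).map (fun c => (p.1, c))) with hps
    cases hp : ps with
    | nil => rfl
    | cons q t =>
      obtain ⟨i, c⟩ := q
      rw [if_neg (List.cons_ne_nil _ _)]
      simp only [List.foldl_cons, List.map_cons]
      have hstep : pvStepG (none, ([] : List Int)) (i, c) = (some c, [i]) := rfl
      rw [hstep, pv_loop_some]
      rw [PySem.List.min?_id_cons]
      by_cases h2 : List.foldl min c (t.map (·.2)) = c
      · simp [h2]
      · have h2' : ¬ c = List.foldl min c (t.map (·.2)) := fun h => h2 h.symm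
        simp [h2, h2']
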